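-- pv_equiv track=rewrite | github.com/pruittkn98/yahtzee-simulator | strategy_utils.py | break_tie_strategic
-- ===== SOURCE A (Python) =====
-- def break_tie_strategic(best_score_idxs: list, tie_break_order_idx: list, is_zero: bool = True):
--     # Breaks ties, based on specified tie break order
--     if len(best_score_idxs) == 1:
--         return best_score_idxs[0], False
--
--     score_idxs = [(i, tie_break_order_idx.index(i)) for i in best_score_idxs]
--
--     # Reverse priority order if score is zero
--     if is_zero:
--         score_idxs = sorted(score_idxs, key=lambda x: x[1], reverse=True)
--     else:
--         score_idxs = sorted(score_idxs, key=lambda x: x[1], reverse=False)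
--
--     return score_idxs[0][0], True
-- ===== SOURCE B (Python) =====
-- def break_tie_strategic(best_score_idxs: list, tie_break_order_idx: list, is_zero: bool = True):
--     # One pass over the priority list builds a value -> first-position map,
--     # then a single min/max picks the winner (no per-candidate .index scan, no sort).
--     if len(best_score_idxs) == 1:
--         return best_score_idxs[0], False
--
--     pos = {}
--     for j, v in enumerate(tie_break_order_idx):
--         pos.setdefault(v, j)
--
--     if is_zero:
--         return max(best_score_idxs, key=lambda i: pos[i]), True
--     return min(best_score_idxs, key=lambda i: pos[i]), True
-- ===== Notes on version B (the rewrite author's own statement) =====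
-- stated objective: alternative
-- what changed: Replaces the per-candidate list.index scan plus stable sort by a single pass building a value-to-first-position dict and one max/min pick over the candidates.
import Mathlib
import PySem

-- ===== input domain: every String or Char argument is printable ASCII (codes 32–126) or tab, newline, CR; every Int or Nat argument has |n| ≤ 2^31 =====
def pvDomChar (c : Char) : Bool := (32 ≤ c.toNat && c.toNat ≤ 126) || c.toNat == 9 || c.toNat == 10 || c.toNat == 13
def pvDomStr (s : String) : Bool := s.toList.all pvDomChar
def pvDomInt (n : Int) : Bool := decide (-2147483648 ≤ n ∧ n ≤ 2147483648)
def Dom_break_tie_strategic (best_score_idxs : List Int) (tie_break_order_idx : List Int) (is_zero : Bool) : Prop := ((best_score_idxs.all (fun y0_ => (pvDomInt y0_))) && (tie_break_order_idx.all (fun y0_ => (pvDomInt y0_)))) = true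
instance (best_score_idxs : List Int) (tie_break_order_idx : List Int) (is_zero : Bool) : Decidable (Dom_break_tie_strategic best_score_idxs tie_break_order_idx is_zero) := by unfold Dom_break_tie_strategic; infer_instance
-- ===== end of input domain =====

-- B replaces A's per-candidate .index scan plus full sort by one pass building a
-- value → first-position map and a single max/min pick (simpler, no sort).

-- ===== PORT A =====
def break_tie_strategic (best_score_idxs : List Int) (tie_break_order_idx : List Int) (is_zero : Bool) : Int × Bool :=
  if best_score_idxs.length == 1 then
    ((PySem.List.pyGet? best_score_idxs 0).getD 0, false)
  else
    -- tie_break_order_idx.index(i); none (ValueError) is excluded by Pre_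
    let score_idxs := best_score_idxs.map (fun i => (i, (PySem.List.index? tie_break_order_idx i).getD 0))
    let score_idxs' :=
      if is_zero then PySem.List.sorted score_idxs (fun x => x.2) true
      else PySem.List.sorted score_idxs (fun x => x.2) false
    match score_idxs' with
    | [] => (0, false)       -- score_idxs[0] : IndexError, excluded by Pre_
    | x :: _ => (x.1, true)

-- ===== PORT B =====
def break_tie_strategic_alt (best_score_idxs : List Int) (tie_break_order_idx : List Int) (is_zero : Bool) : Int × Bool :=
  if best_score_idxs.length == 1 then
    ((PySem.List.pyGet? best_score_idxs 0).getD 0, false)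
  else
    -- for j, v in enumerate(...): pos.setdefault(v, j)   (dict accumulator paired with the counter j)
    let pos := (tie_break_order_idx.foldl
      (fun (s : PySem.Dict Int Nat × Nat) v => (s.1.setdefault v s.2, s.2 + 1))
      (PySem.Dict.empty, 0)).1
    -- pos[i] : KeyError on a missing candidate, excluded by Pre_
    let key := fun (i : Int) => (pos.get? i).getD 0
    if is_zero then ((PySem.List.max? best_score_idxs key).getD 0, true)
    else ((PySem.List.min? best_score_idxs key).getD 0, true)

-- ===== PRECONDITION & SPEC =====
-- Pre_ excludes exactly the inputs on which A raises: empty best_score_idxs (IndexError) and,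
-- when there is more than one candidate, a candidate absent from tie_break_order_idx (ValueError).
def Pre_break_tie_strategic (best_score_idxs : List Int) (tie_break_order_idx : List Int) (is_zero : Bool) : Prop :=
  best_score_idxs ≠ [] ∧
  (best_score_idxs.length = 1 ∨ ∀ x ∈ best_score_idxs, x ∈ tie_break_order_idx)
instance (best_score_idxs : List Int) (tie_break_order_idx : List Int) (is_zero : Bool) : Decidable (Pre_break_tie_strategic best_score_idxs tie_break_order_idx is_zero) := by unfold Pre_break_tie_strategic; infer_instance
def pvWitness_break_tie_strategic : List Int × List Int × Bool := ([2, 5], [5, 1, 2], true)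

def Spec_break_tie_strategic (best_score_idxs : List Int) (tie_break_order_idx : List Int) (is_zero : Bool) (out : Int × Bool) : Prop := out = break_tie_strategic_alt best_score_idxs tie_break_order_idx is_zero
instance (best_score_idxs : List Int) (tie_break_order_idx : List Int) (is_zero : Bool) (out : Int × Bool) : Decidable (Spec_break_tie_strategic best_score_idxs tie_break_order_idx is_zero out) := by unfold Spec_break_tie_strategic; infer_instance

-- ===== CLAIM (what is proved, stated in full; the proofs are below) =====
def Claim_equal_break_tie_strategic : Prop := ∀ (best_score_idxs : List Int) (tie_break_order_idx : List Int) (is_zero : Bool), Dom_break_tie_strategic best_score_idxs tie_break_order_idx is_zero → Pre_break_tie_strategic best_score_idxs tie_break_order_idx is_zero → Spec_break_tie_strategic best_score_idxs tie_break_order_idx is_zero (break_tie_strategic best_score_idxs tie_break_order_idx is_zero)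

-- ===== LEMMAS AND PROOFS =====

-- B's setdefault loop computes the FIRST position of each value, i.e. Python's list.index.
theorem pos_loop_spec (t : List Int) (d : PySem.Dict Int Nat) (k : Nat) (v : Int) :
    ((t.foldl (fun (s : PySem.Dict Int Nat × Nat) x => (s.1.setdefault x s.2, s.2 + 1)) (d, k)).1).get? v =
      if d.contains v then d.get? v
      else ((PySem.List.index? t v).map (· + k)) := by
  induction t generalizing d k with
  | nil =>
    simp only [List.foldl_nil]
    by_cases h : d.contains v
    · simp [h]
    · simp [h, (PySem.Dict.get?_eq_none_iff_contains d v).mpr (by simpa using h),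
        PySem.List.index?_eq_idxOf?, List.idxOf?]
  | cons a t ih =>
    simp only [List.foldl_cons, ih]
    by_cases hv : d.contains v
    · have hc : (d.setdefault a k).contains v = true := by
        by_cases hac : d.contains a
        · simpa [PySem.Dict.setdefault_of_contains d k hac] using hv
        · by_cases hav : v = a
          · simp [hav, PySem.Dict.setdefault_of_not_contains d k (by simpa using hac),
              PySem.Dict.contains_insert]
          · simp [PySem.Dict.setdefault_of_not_contains d k (by simpa using hac),
              PySem.Dict.contains_insert, hav, hv]
      simp only [hc, if_true, hv, if_true]
      by_cases hac : d.contains a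
      · simp [PySem.Dict.setdefault_of_contains d k hac]
      · by_cases hav : v = a
        · exact absurd (hav ▸ hv) (by simpa using hac)
        · simp [PySem.Dict.setdefault_of_not_contains d k (by simpa using hac),
            PySem.Dict.get?_insert_of_ne d k hav]
    · by_cases hav : v = a
      · subst hav
        rw [PySem.List.index?_cons_self]
        simp [PySem.Dict.setdefault_of_not_contains d k (by simpa using hv),
          PySem.Dict.contains_insert, hv, PySem.Dict.get?_insert_self]
      · have hc : (d.setdefault a k).contains v = false := by
          by_cases hac : d.contains a
          · simpa [PySem.Dict.setdefault_of_contains d k hac] using hv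
          · simp only [PySem.Dict.setdefault_of_not_contains d k (by simpa using hac),
              PySem.Dict.contains_insert, hav]
            simpa [hav] using hv
        rw [PySem.List.index?_cons_of_ne t (fun h => hav h.symm)]
        simp only [hc, if_false, hv, if_false, Option.map_map]
        cases PySem.List.index? t v <;> simp [Function.comp] <;> omega

theorem pos_get (t : List Int) (v : Int) :
    (((t.foldl (fun (s : PySem.Dict Int Nat × Nat) x => (s.1.setdefault x s.2, s.2 + 1))
        (PySem.Dict.empty, 0)).1).get? v) = PySem.List.index? t v := by
  rw [pos_loop_spec]
  simp [PySem.Dict.contains_empty]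

-- first-occurrence position determines the value: two members with equal index are equal
theorem index_getD_inj (t : List Int) {a b : Int} (ha : a ∈ t) (hb : b ∈ t)
    (h : (PySem.List.index? t a).getD 0 = (PySem.List.index? t b).getD 0) : a = b := by
  obtain ⟨ka, hka⟩ := Option.isSome_iff_exists.mp ((PySem.List.index?_isSome_iff t a).mpr ha)
  obtain ⟨kb, hkb⟩ := Option.isSome_iff_exists.mp ((PySem.List.index?_isSome_iff t b).mpr hb)
  rw [hka, hkb] at h
  simp only [Option.getD_some] at h
  subst h
  obtain ⟨_, hga, -⟩ := PySem.List.getElem_of_index?_eq_some hka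
  obtain ⟨_, hgb, -⟩ := PySem.List.getElem_of_index?_eq_some hkb
  rw [← hga, ← hgb]

-- ===== VERDICT (by name: the statement is the Claim_ definition above) =====
theorem break_tie_strategic_spec : Claim_equal_break_tie_strategic := by
  intro bs t z _ hpre
  unfold Spec_break_tie_strategic
  rcases hpre with ⟨hne, hcase⟩
  unfold break_tie_strategic break_tie_strategic_alt
  by_cases h1 : bs.length = 1
  · simp [h1]
  · have hmem : ∀ x ∈ bs, x ∈ t := by
      rcases hcase with h | h
      · exact absurd h h1
      · exact h
    have hb : (bs.length == 1) = false := by simpa using h1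
    simp only [hb, Bool.false_eq_true, if_false]
    have hkey : ∀ i : Int,
        ((((t.foldl (fun (s : PySem.Dict Int Nat × Nat) x => (s.1.setdefault x s.2, s.2 + 1))
          (PySem.Dict.empty, 0)).1).get? i).getD 0) = (PySem.List.index? t i).getD 0 := by
      intro i; rw [pos_get]
    have hLne : bs.map (fun i => (i, (PySem.List.index? t i).getD 0)) ≠ [] := by
      simpa using hne
    cases z with
    | true =>
      simp only [if_true]
      cases hm' : PySem.List.max? (α := Int) (κ := Nat) bs
          (fun i => (((t.foldl (fun (s : PySem.Dict Int Nat × Nat) x => (s.1.setdefault x s.2, s.2 + 1))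
            (PySem.Dict.empty, 0)).1).get? i).getD 0) with
      | none => exact absurd ((PySem.List.max?_eq_none_iff _ _).mp hm') hne
      | some m' =>
      obtain ⟨m, rest, hsort⟩ := List.exists_cons_of_ne_nil
        (fun h => hLne ((PySem.List.sorted_eq_nil_iff _ (fun x : Int × Nat => x.2) true).mp h))
      rw [hsort]
      simp only [Option.getD_some, Prod.mk.injEq, and_true]
      have hmmem : m ∈ bs.map (fun i => (i, (PySem.List.index? t i).getD 0)) := by
        have : m ∈ PySem.List.sorted (bs.map (fun i => (i, (PySem.List.index? t i).getD 0))) (fun x => x.2) true := by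
          rw [hsort]; exact List.mem_cons_self
        exact (PySem.List.mem_sorted _ _ _ _).mp this
      obtain ⟨i0, hi0, hmi⟩ := List.mem_map.mp hmmem
      have hm'mem := PySem.List.max?_mem hm'
      have hle := PySem.List.max?_isMax hm' i0 hi0
      simp only [hkey] at hle
      have hge := PySem.List.key_head_sorted_rev_ge _ _ hsort
        ((m', (PySem.List.index? t m').getD 0)) (List.mem_map.mpr ⟨m', hm'mem, rfl⟩)
      simp only at hge
      have hm2 : m.2 = (PySem.List.index? t i0).getD 0 := by rw [← hmi]
      have hm1 : m.1 = i0 := by rw [← hmi]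
      rw [hm1]
      exact index_getD_inj t (hmem i0 hi0) (hmem m' hm'mem) (by omega)
    | false =>
      simp only [Bool.false_eq_true, if_false]
      cases hm' : PySem.List.min? (α := Int) (κ := Nat) bs
          (fun i => (((t.foldl (fun (s : PySem.Dict Int Nat × Nat) x => (s.1.setdefault x s.2, s.2 + 1))
            (PySem.Dict.empty, 0)).1).get? i).getD 0) with
      | none => exact absurd ((PySem.List.min?_eq_none_iff _ _).mp hm') hne
      | some m' =>
      obtain ⟨m, rest, hsort⟩ := List.exists_cons_of_ne_nil
        (fun h => hLne ((PySem.List.sorted_eq_nil_iff _ (fun x : Int × Nat => x.2) false).mp h))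
      rw [hsort]
      simp only [Option.getD_some, Prod.mk.injEq, and_true]
      have hmmem : m ∈ bs.map (fun i => (i, (PySem.List.index? t i).getD 0)) := by
        have : m ∈ PySem.List.sorted (bs.map (fun i => (i, (PySem.List.index? t i).getD 0))) (fun x => x.2) false := by
          rw [hsort]; exact List.mem_cons_self
        exact (PySem.List.mem_sorted _ _ _ _).mp this
      obtain ⟨i0, hi0, hmi⟩ := List.mem_map.mp hmmem
      have hm'mem := PySem.List.min?_mem hm'
      have hle := PySem.List.min?_isMin hm' i0 hi0
      simp only [hkey] at hle
      have hge := PySem.List.key_head_sorted_le _ _ hsort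
        ((m', (PySem.List.index? t m').getD 0)) (List.mem_map.mpr ⟨m', hm'mem, rfl⟩)
      simp only at hge
      have hm2 : m.2 = (PySem.List.index? t i0).getD 0 := by rw [← hmi]
      have hm1 : m.1 = i0 := by rw [← hmi]
      rw [hm1]
      exact index_getD_inj t (hmem i0 hi0) (hmem m' hm'mem) (by omega)
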